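-- pv_equiv track=rewrite | github.com/FreshWaterLee/Raspberry_Project | Image_Code(OpenCv)/lane_detect/Custom_F.py | check_r
-- ===== SOURCE A (Python) =====
-- Lane_D = 7 ## Lane' Detecting Length
--
-- def check_r(image, i, h,flag):
--     if(flag == Lane_D):
--         check =1
--         return check, flag
--     else:
--         if (image[h][i] >= 1):
--             return check_r(image,i+1,h,flag+1)
--         else:
--             check = 0
--             return check,flag
-- ===== SOURCE B (Python) =====
-- Lane_D = 7  ## Lane' Detecting Length
--
-- def check_r(image, i, h, flag):
--     if flag == Lane_D:
--         return 1, flag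
--     row = image[h]
--     need = Lane_D - flag
--     k = 0
--     while k != need:
--         if row[i + k] < 1:
--             return 0, flag + k
--         k += 1
--     return 1, Lane_D
-- ===== Notes on version B (the rewrite author's own statement) =====
-- stated objective: idiomatic
-- what changed: Replaces the tail recursion that rebinds (i, flag) each call with an iterative counter loop over the row fetched once, reconstructing the returned flag arithmetically as flag + k.
import Mathlib
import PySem

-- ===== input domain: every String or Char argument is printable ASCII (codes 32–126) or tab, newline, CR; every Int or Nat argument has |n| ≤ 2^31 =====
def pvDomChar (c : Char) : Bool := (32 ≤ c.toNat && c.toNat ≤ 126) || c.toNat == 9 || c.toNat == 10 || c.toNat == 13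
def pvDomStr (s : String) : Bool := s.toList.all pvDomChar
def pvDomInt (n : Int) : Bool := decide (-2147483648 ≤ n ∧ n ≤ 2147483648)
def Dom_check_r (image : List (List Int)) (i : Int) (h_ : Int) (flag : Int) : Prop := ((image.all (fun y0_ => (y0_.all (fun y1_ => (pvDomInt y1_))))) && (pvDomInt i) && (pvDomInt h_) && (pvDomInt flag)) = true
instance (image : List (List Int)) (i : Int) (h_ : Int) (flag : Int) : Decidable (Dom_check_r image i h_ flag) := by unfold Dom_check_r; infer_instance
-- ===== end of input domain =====

-- B replaces A's tail recursion on (i, flag) by an iterative counter loop over the row fetched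
-- once, reconstructing the returned flag as flag + k (idiomatic; same linear scan cost).


-- shared fuel bound: on every input admitted by Pre_check_r the Python run returns within
-- this many steps, so the fuel-0 branches of both ports are never reached there
def pvFuel (image : List (List Int)) (i : Int) (h_ : Int) (flag : Int) : Nat :=
  (7 - flag).toNat + ((PySem.List.pyGet? image h_).getD []).length + i.natAbs + 1

-- ===== PORT A =====
-- literal transliteration of A's recursion; fuel-0 / IndexError branches (outside Pre_) return (0, flag)
def check_rA_go (image : List (List Int)) (h_ : Int) : Int → Int → Nat → Int × Int
  | _, flag, 0 => (0, flag)
  | i, flag, Nat.succ n =>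
    if flag = 7 then (1, flag)
    else
      match (PySem.List.pyGet? image h_).bind (fun row => PySem.List.pyGet? row i) with
      | some v => if 1 ≤ v then check_rA_go image h_ (i + 1) (flag + 1) n else (0, flag)
      | none => (0, flag)

def check_r (image : List (List Int)) (i : Int) (h_ : Int) (flag : Int) : Int × Int :=
  check_rA_go image h_ i flag (pvFuel image i h_ flag)

-- ===== PORT B =====
-- literal transliteration of B's while loop over counter k; fuel-0 / IndexError branches return (0, 0)
def check_rB_go (row : List Int) (i : Int) (flag : Int) (need : Int) : Nat → Nat → Int × Int
  | _, 0 => (0, 0)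
  | k, Nat.succ n =>
    if (k : Int) = need then (1, 7)
    else
      match PySem.List.pyGet? row (i + k) with
      | some v => if v < 1 then (0, flag + k) else check_rB_go row i flag need (k + 1) n
      | none => (0, 0)

def check_r_alt (image : List (List Int)) (i : Int) (h_ : Int) (flag : Int) : Int × Int :=
  if flag = 7 then (1, flag)
  else
    match PySem.List.pyGet? image h_ with
    | some row => check_rB_go row i flag (7 - flag) 0 (pvFuel image i h_ flag)
    | none => (0, 0)

-- ===== PRECONDITION & SPEC =====
def pixOk (row : List Int) (x : Int) : Bool :=
  match PySem.List.pyGet? row x with | some v => 1 ≤ v | none => false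
def pixStop (row : List Int) (x : Int) : Bool :=
  match PySem.List.pyGet? row x with | some v => v < 1 | none => false
def goodPrefix (row : List Int) (i : Int) (k : Nat) : Bool :=
  (List.range k).all (fun j => pixOk row (i + j))

-- Pre_check_r holds exactly when Python A returns normally: flag is already 7, or the row
-- image[h] exists and the scan from i either reaches 7 lane pixels or hits a pixel < 1
-- at a valid index first; excluded are exactly the inputs where A raises IndexError.
def Pre_check_r (image : List (List Int)) (i : Int) (h_ : Int) (flag : Int) : Prop :=
  ((flag == 7) ||
    (match PySem.List.pyGet? image h_ with
     | none => false
     | some row =>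
       (decide (flag < 7) && goodPrefix row i (7 - flag).toNat) ||
       (List.range (2 * row.length)).any
         (fun k => goodPrefix row i k && pixStop row (i + k)))) = true

instance (image : List (List Int)) (i : Int) (h_ : Int) (flag : Int) : Decidable (Pre_check_r image i h_ flag) := by unfold Pre_check_r; infer_instance

def pvWitness_check_r : List (List Int) × Int × Int × Int := ([[1, 1, 1, 1, 1, 1, 1, 0]], 0, 0, 0)

def Spec_check_r (image : List (List Int)) (i : Int) (h_ : Int) (flag : Int) (out : Int × Int) : Prop := out = check_r_alt image i h_ flag
instance (image : List (List Int)) (i : Int) (h_ : Int) (flag : Int) (out : Int × Int) : Decidable (Spec_check_r image i h_ flag out) := by unfold Spec_check_r; infer_instance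

-- ===== CLAIM (what is proved, stated in full; the proofs are below) =====
def Claim_equal_check_r : Prop := ∀ (image : List (List Int)) (i : Int) (h_ : Int) (flag : Int), Dom_check_r image i h_ flag → Pre_check_r image i h_ flag → Spec_check_r image i h_ flag (check_r image i h_ flag)

-- ===== LEMMAS AND PROOFS =====

-- the run starting at index x with flag f returns within n steps
def RetIn (row : List Int) : Int → Int → Nat → Prop
  | _, _, 0 => False
  | x, f, Nat.succ n => f = 7 ∨ pixStop row x = true ∨ (pixOk row x = true ∧ RetIn row (x + 1) (f + 1) n)

lemma retIn_intro (row : List Int) :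
    ∀ (m : Nat) (x f : Int) (n : Nat),
      (∀ j : Nat, j < m → pixOk row (x + j) = true) →
      (f + m = 7 ∨ pixStop row (x + m) = true) →
      m < n → RetIn row x f n := by
  intro m
  induction m with
  | zero =>
    intro x f n hok hstop hn
    cases n with
    | zero => omega
    | succ n =>
      simp only [RetIn]
      rcases hstop with h7 | hs
      · left; simpa using h7
      · right; left; simpa using hs
  | succ m ih =>
    intro x f n hok hstop hn
    cases n with
    | zero => omega
    | succ n =>
      simp only [RetIn]
      right; right
      constructor
      · simpa using hok 0 (by omega)
      · apply ih (x + 1) (f + 1) n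
        · intro j hj
          have := hok (j + 1) (by omega)
          push_cast at this ⊢
          convert this using 2
          ring
        · rcases hstop with h7 | hs
          · left; push_cast at h7 ⊢; omega
          · right
            push_cast at hs ⊢
            convert hs using 2
            ring
        · omega

lemma main_eq (image : List (List Int)) (h_ : Int) (row : List Int)
    (hrow : PySem.List.pyGet? image h_ = some row) (i flag : Int) :
    ∀ (n : Nat) (k : Nat), RetIn row (i + k) (flag + k) n →
      check_rA_go image h_ (i + k) (flag + k) n = check_rB_go row i flag (7 - flag) k n := by
  intro n
  induction n with
  | zero => intro k h; exact absurd h (by simp [RetIn])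
  | succ n ih =>
    intro k hret
    simp only [check_rA_go, check_rB_go, hrow, Option.bind_some]
    by_cases h7 : flag + (k : Int) = 7
    · have hk : (k : Int) = 7 - flag := by omega
      rw [if_pos h7, if_pos hk, h7]
    · have hk : ¬ ((k : Int) = 7 - flag) := by omega
      rw [if_neg h7, if_neg hk]
      simp only [RetIn] at hret
      rcases hret with h | hs | ⟨hok, hrec⟩
      · omega
      · unfold pixStop at hs
        cases hv : PySem.List.pyGet? row (i + k) with
        | none => rw [hv] at hs; simp at hs
        | some v =>
          rw [hv] at hs
          simp only [decide_eq_true_eq] at hs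
          simp [show ¬ (1 ≤ v) from by omega, hs]
      · unfold pixOk at hok
        cases hv : PySem.List.pyGet? row (i + k) with
        | none => rw [hv] at hok; simp at hok
        | some v =>
          rw [hv] at hok
          simp only [decide_eq_true_eq] at hok
          simp only [if_pos hok, show ¬ (v < 1) from by omega, if_false]
          rw [show i + (k : Int) + 1 = i + ((k + 1 : Nat) : Int) from by push_cast; ring,
              show flag + (k : Int) + 1 = flag + ((k + 1 : Nat) : Int) from by push_cast; ring]
          apply ih (k + 1)
          rw [show i + ((k + 1 : Nat) : Int) = i + (k : Int) + 1 from by push_cast; ring,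
              show flag + ((k + 1 : Nat) : Int) = flag + (k : Int) + 1 from by push_cast; ring]
          exact hrec

lemma pyGet?_some_bounds {row : List Int} {x : Int} {v : Int}
    (h : PySem.List.pyGet? row x = some v) : -(row.length : Int) ≤ x ∧ x < row.length := by
  by_contra hc
  have : ¬ PySem.Raise.InRange row.length x := by
    simp only [PySem.Raise.InRange]; omega
  rw [← PySem.List.pyGet?_eq_none_iff (xs := row)] at this
  rw [h] at this; simp at this

lemma goodPrefix_forall {row : List Int} {i : Int} {k : Nat}
    (h : goodPrefix row i k = true) : ∀ j : Nat, j < k → pixOk row (i + j) = true := by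
  intro j hj
  unfold goodPrefix at h
  rw [List.all_eq_true] at h
  exact h j (List.mem_range.mpr hj)

-- ===== VERDICT (by name: the statement is the Claim_ definition above) =====
theorem check_r_spec : Claim_equal_check_r := by
  intro image i h_ flag _ hpre
  unfold Spec_check_r
  unfold Pre_check_r at hpre
  by_cases h7 : flag = 7
  · -- both sides answer (1, flag) immediately
    unfold check_r check_r_alt pvFuel check_rA_go
    simp [h7]
  · simp only [Bool.or_eq_true, beq_iff_eq, h7, false_or] at hpre
    cases hrow : PySem.List.pyGet? image h_ with
    | none => rw [hrow] at hpre; simp at hpre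
    | some row =>
      rw [hrow] at hpre
      simp only [Bool.or_eq_true, Bool.and_eq_true, decide_eq_true_eq, List.any_eq_true,
        List.mem_range] at hpre
      have hfuel : pvFuel image i h_ flag =
          (7 - flag).toNat + row.length + i.natAbs + 1 := by
        unfold pvFuel; rw [hrow]; rfl
      -- establish RetIn at the start of the run
      have hret : RetIn row i flag (pvFuel image i h_ flag) := by
        rcases hpre with ⟨hlt, hgood⟩ | ⟨k, _, hgood, hstop⟩
        · apply retIn_intro row (7 - flag).toNat i flag _ (goodPrefix_forall hgood)
          · left; omega
          · omega
        · apply retIn_intro row k i flag _ (goodPrefix_forall hgood) (Or.inr hstop)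
          have hv : ∃ v, PySem.List.pyGet? row (i + k) = some v := by
            unfold pixStop at hstop
            cases hx : PySem.List.pyGet? row (i + k) with
            | none => rw [hx] at hstop; simp at hstop
            | some v => exact ⟨v, rfl⟩
          obtain ⟨v, hv⟩ := hv
          have hb := pyGet?_some_bounds hv
          rw [hfuel]
          have h2 : (k : Int) < (row.length : Int) + (i.natAbs : Int) := by
            rcases Int.natAbs_eq i with h | h <;> omega
          omega
      have := main_eq image h_ row hrow i flag (pvFuel image i h_ flag) 0
        (by simpa using hret)
      unfold check_r check_r_alt
      rw [hrow]
      simp only [if_neg h7]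
      simpa using this
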